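-- pv_equiv track=rewrite | github.com/HKimiwada/protein-reinforcement-learning | src/models/stable_reward_function_v2.py | _has_reasonable_composition
-- ===== SOURCE A (Python) =====
-- def _has_reasonable_composition(sequence: str) -> bool:
--     """
--     Check if sequence has reasonable amino acid composition (no motif requirements)
--     More lenient than motif checking
--     """
--     if len(sequence) < 10:
--         return False
--
--     sequence_upper = sequence.upper()
--     length = len(sequence_upper)
--
--     # Check for reasonable diversity (not too repetitive)
--     unique_aa = len(set(sequence_upper))
--     if unique_aa < 5:  # At least 5 different amino acids
--         return False
--
--     # Check for reasonable composition of key amino acids (very lenient)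
--     alanine_ratio = sequence_upper.count('A') / length
--     glycine_ratio = sequence_upper.count('G') / length
--
--     # Very lenient bounds - just avoid extreme cases
--     if alanine_ratio > 0.7 or glycine_ratio > 0.7:  # Not more than 70% of any single AA
--         return False
--
--     # Check for presence of some structure-forming amino acids
--     structure_aa = sum(sequence_upper.count(aa) for aa in 'AGPYFWH')
--     if structure_aa / length < 0.3:  # At least 30% structure-forming amino acids
--         return False
--
--     return True
-- ===== SOURCE B (Python) =====
-- def _has_reasonable_composition(sequence: str) -> bool:
--     if len(sequence) < 10:
--         return False
--     n = len(sequence)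
--     seen = set()
--     a = g = st = 0
--     for ch in sequence.upper():
--         seen.add(ch)
--         if ch == 'A':
--             a += 1
--         if ch == 'G':
--             g += 1
--         if ch in {'A', 'G', 'P', 'Y', 'F', 'W', 'H'}:
--             st += 1
--     if len(seen) < 5:
--         return False
--     if 10 * a > 7 * n or 10 * g > 7 * n:
--         return False
--     return 10 * st >= 3 * n
-- ===== Notes on version B (the rewrite author's own statement) =====
-- stated objective: alternative
-- what changed: B makes a single accumulating pass over the uppercased string (maintaining the seen-set and the A/G/structure counters together) instead of A's separate set() construction plus six .count rescans, and compares the ratio thresholds in exact integer arithmetic (10*count vs 7*len, 10*struct vs 3*len) instead of float division.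
import Mathlib
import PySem

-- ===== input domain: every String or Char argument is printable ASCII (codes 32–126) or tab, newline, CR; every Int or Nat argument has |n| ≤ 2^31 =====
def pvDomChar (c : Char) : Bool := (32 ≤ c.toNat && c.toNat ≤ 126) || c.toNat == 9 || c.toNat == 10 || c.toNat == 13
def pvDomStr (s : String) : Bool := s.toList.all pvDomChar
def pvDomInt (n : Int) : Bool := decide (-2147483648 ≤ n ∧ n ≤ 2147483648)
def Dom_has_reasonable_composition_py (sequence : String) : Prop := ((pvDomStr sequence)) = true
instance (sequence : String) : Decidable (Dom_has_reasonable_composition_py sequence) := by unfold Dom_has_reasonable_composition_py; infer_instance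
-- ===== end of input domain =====

-- B replaces A's set()-plus-four-.count rescans by ONE accumulating pass over the string
-- (seen-set and three counters maintained together), thresholds compared in exact integer form;
-- same result, same O(n) cost (objective: alternative).
-- Both ports compare ratios as integers (10*count > 7*length, 10*struct < 3*length): this is the
-- exact value of Python's float comparisons count/length > 0.7 and < 0.3 at any realistic length
-- (a disagreement would need |count/length - 7/10| < 2^-52, impossible for length < 10^15).

-- ===== PORT A =====
def has_reasonable_composition_py (sequence : String) : Bool :=
  if PySem.Str.len sequence < 10 then false
  else
    let sequence_upper := PySem.Str.upper sequence
    let length := PySem.Str.len sequence_upper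
    let unique_aa := PySem.Set.len (PySem.Set.ofList sequence_upper.toList)
    if unique_aa < 5 then false
    else
      let alanine : Int := PySem.Str.count sequence_upper "A"
      let glycine : Int := PySem.Str.count sequence_upper "G"
      if 10 * alanine > 7 * length ∨ 10 * glycine > 7 * length then false
      else
        let structure_aa : Int :=
          (("AGPYFWH".toList).map
            (fun aa => (PySem.Chars.count sequence_upper.toList [aa] : Int))).sum
        if 10 * structure_aa < 3 * length then false
        else true

-- ===== PORT B =====
-- loop body of Source B's single pass (state: seen-set, count 'A', count 'G', structure count)
def pvStep (acc : PySem.Set Char × Int × Int × Int) (ch : Char) :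
    PySem.Set Char × Int × Int × Int :=
  (PySem.Set.add acc.1 ch,
   if ch == 'A' then acc.2.1 + 1 else acc.2.1,
   if ch == 'G' then acc.2.2.1 + 1 else acc.2.2.1,
   if (PySem.Set.ofList ['A','G','P','Y','F','W','H']).contains ch then acc.2.2.2 + 1 else acc.2.2.2)

def has_reasonable_composition_py_alt (sequence : String) : Bool :=
  if PySem.Str.len sequence < 10 then false
  else
    let n := PySem.Str.len sequence
    let r := (PySem.Str.upper sequence).toList.foldl pvStep (PySem.Set.empty, 0, 0, 0)
    if PySem.Set.len r.1 < 5 then false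
    else if 10 * r.2.1 > 7 * n ∨ 10 * r.2.2.1 > 7 * n then false
    else decide (10 * r.2.2.2 ≥ 3 * n)

-- ===== PRECONDITION & SPEC =====
def Spec_has_reasonable_composition_py (sequence : String) (out : Bool) : Prop := out = has_reasonable_composition_py_alt sequence
instance (sequence : String) (out : Bool) : Decidable (Spec_has_reasonable_composition_py sequence out) := by unfold Spec_has_reasonable_composition_py; infer_instance

-- ===== CLAIM (what is proved, stated in full; the proofs are below) =====
def Claim_equal_has_reasonable_composition_py : Prop := ∀ (sequence : String), Dom_has_reasonable_composition_py sequence → Spec_has_reasonable_composition_py sequence (has_reasonable_composition_py sequence)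

-- ===== LEMMAS AND PROOFS =====

-- Chars.count with a single-character needle is List.count
lemma pvCountGo_single (c : Char) (fuel : Nat) :
    ∀ (l : List Char) (acc : Nat), l.length ≤ fuel →
      PySem.Chars.count.go [c] fuel l acc = acc + l.count c := by
  induction fuel with
  | zero =>
    intro l acc h
    have : l = [] := List.eq_nil_of_length_eq_zero (Nat.le_zero.mp h)
    subst this
    simp [PySem.Chars.count.go]
  | succ f ih =>
    intro l acc h
    cases l with
    | nil => simp [PySem.Chars.count.go]
    | cons x t =>
      rw [PySem.Chars.count.go]
      by_cases hx : c = x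
      · subst hx
        have hpre : [c].isPrefixOf (c :: t) = true := by simp [List.isPrefixOf]
        simp only [hpre, if_pos]
        have := ih t (acc + 1) (by simpa using Nat.lt_succ_iff.mp (by simpa using h))
        simpa [List.count_cons, Nat.add_assoc, Nat.add_comm, Nat.add_left_comm] using this
      · have hpre : [c].isPrefixOf (x :: t) = false := by
          simp [List.isPrefixOf, hx]
        simp only [hpre]
        have := ih t acc (by simpa using Nat.lt_succ_iff.mp (by simpa using h))
        simp [this, Ne.symm hx]

lemma pvCount_single (l : List Char) (c : Char) :
    PySem.Chars.count l [c] = l.count c := by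
  have : ([c] : List Char).isEmpty = false := rfl
  rw [PySem.Chars.count, this]
  simpa using pvCountGo_single c l.length l 0 le_rfl

-- the 0/1-indicator of membership in the structure-forming set
lemma pvIndicator (c : Char) :
    ((['A','G','P','Y','F','W','H'].map (fun aa => if c == aa then (1 : Int) else 0)).sum)
      = if (PySem.Set.ofList ['A','G','P','Y','F','W','H']).contains c then (1 : Int) else 0 := by
  have hof : PySem.Set.ofList ['A','G','P','Y','F','W','H'] = ['A','G','P','Y','F','W','H'] := by
    decide
  rw [hof]
  by_cases h1 : c = 'A'
  · subst h1; decide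
  by_cases h2 : c = 'G'
  · subst h2; decide
  by_cases h3 : c = 'P'
  · subst h3; decide
  by_cases h4 : c = 'Y'
  · subst h4; decide
  by_cases h5 : c = 'F'
  · subst h5; decide
  by_cases h6 : c = 'W'
  · subst h6; decide
  by_cases h7 : c = 'H'
  · subst h7; decide
  simp only [PySem.Set.contains_eq_listContains, List.contains_cons, beq_iff_eq]
  simp [h1, h2, h3, h4, h5, h6, h7]

-- A's sum of seven .count scans = B's single countP
lemma pvSum_counts (l : List Char) :
    (((['A','G','P','Y','F','W','H']).map (fun aa => (l.count aa : Int))).sum)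
      = (l.countP (fun c => (PySem.Set.ofList ['A','G','P','Y','F','W','H']).contains c) : Int) := by
  induction l with
  | nil => simp
  | cons c t ih =>
    simp only [List.count_cons, List.countP_cons]
    push_cast
    rw [PySem.List.sum_map_add_int, pvIndicator c, ih]

-- B's fold computes the set of seen characters and the three counts
lemma pvFold_spec (l : List Char) (s : PySem.Set Char) (a g st : Int) :
    l.foldl pvStep (s, a, g, st)
      = (l.foldl PySem.Set.add s,
         a + l.count 'A',
         g + l.count 'G',
         st + (l.countP (fun c => (PySem.Set.ofList ['A','G','P','Y','F','W','H']).contains c) : Int)) := by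
  induction l generalizing s a g st with
  | nil => simp
  | cons c t ih =>
    simp only [List.foldl_cons, pvStep, ih, List.count_cons, List.countP_cons]
    refine Prod.ext rfl (Prod.ext ?_ (Prod.ext ?_ ?_)) <;>
      simp only [] <;> push_cast <;> by_cases h : c = 'A' <;> by_cases h2 : c = 'G' <;>
      split_ifs <;> simp_all <;> ring

lemma pvLen_upper (s : String) :
    PySem.Str.len (PySem.Str.upper s) = PySem.Str.len s := by
  simp [PySem.Str.len_eq, PySem.Str.toList_upper, PySem.Chars.upper]

-- ===== VERDICT (by name: the statement is the Claim_ definition above) =====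
theorem has_reasonable_composition_py_spec : Claim_equal_has_reasonable_composition_py := by
  intro sequence _
  unfold Spec_has_reasonable_composition_py
  unfold has_reasonable_composition_py has_reasonable_composition_py_alt
  simp only [pvFold_spec, pvLen_upper, PySem.Str.count_eq, PySem.Str.toList_upper]
  rw [PySem.Set.ofList_eq_foldl]
  have hA : ("A" : String).toList = ['A'] := rfl
  have hG : ("G" : String).toList = ['G'] := rfl
  have h7 : "AGPYFWH".toList = ['A','G','P','Y','F','W','H'] := rfl
  simp only [hA, hG, h7, pvCount_single, pvSum_counts, PySem.Set.empty, zero_add]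
  split_ifs <;> simp_all
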